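-- pv_equiv track=rewrite | github.com/pypi-data/pypi-mirror-397 | packages/shadowlib/shadowlib-3.4.0.tar.gz/shadowlib-3.4.0/shadowlib/_internal/scraper/scraper.py | _findDeclaringClass
-- ===== SOURCE A (Python) =====
-- from typing import Any, Dict, List, Set, Tuple
--
-- def _findDeclaringClass(
--     class_list: List[Tuple[str, Any]], child_to_parent: Dict[str, str]
-- ) -> str:
--     """
--     Find the topmost class in the hierarchy that declares this method.
--
--     Args:
--         class_list: List of (class_path, generic_type) tuples that declare this method
--         child_to_parent: Mapping of child class names to parent class names
--
--     Returns:
--         The class_path of the declaring class (topmost in hierarchy)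
--     """
--     # Extract class paths and convert to simple names
--     class_paths = [c[0] for c in class_list]
--
--     # If only one class, it's the declaring class
--     if len(class_paths) == 1:
--         return class_paths[0]
--
--     # Extract simple names from full paths
--     simple_names = {path: path.split("/")[-1] for path in class_paths}
--
--     # Build hierarchy for these classes
--     # Find which classes are ancestors of others
--     def getAncestors(class_name: str) -> List[str]:
--         """Get all ancestors of a class in order (parent, grandparent, ...)"""
--         ancestors = []
--         current = class_name
--         seen = set()  # Prevent infinite loops
--
--         while current in child_to_parent and current not in seen:
--             seen.add(current)
--             parent = child_to_parent[current]
--             ancestors.append(parent)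
--             current = parent
--
--         return ancestors
--
--     # For each class, get its ancestors
--     class_hierarchies = {}
--     for path, simple_name in simple_names.items():
--         ancestors = getAncestors(simple_name)
--         class_hierarchies[simple_name] = ancestors
--
--     # Find the topmost class (the one that is an ancestor of all others)
--     # or has no parent among the classes in our list
--     for path, simple_name in simple_names.items():
--         # Check if this class is an ancestor of all other classes
--         other_classes = [sn for sn in simple_names.values() if sn != simple_name]
--
--         # If this class appears in the ancestor list of all others, it's the declaring class
--         is_ancestor_of_all = all(
--             simple_name in class_hierarchies.get(other, []) for other in other_classes
--         )
--
--         if is_ancestor_of_all: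
--             return path
--
--     # If no clear ancestor found, return the first one (shouldn't happen with good data)
--     # This handles cases where multiple unrelated classes declare the same method
--     return class_paths[0]
-- ===== SOURCE B (Python) =====
-- from typing import Any, Dict, List, Tuple
--
-- def _findDeclaringClass(
--     class_list: List[Tuple[str, Any]], child_to_parent: Dict[str, str]
-- ) -> str:
--     """Inverted-index re-implementation: build descendants[ancestor] once, then
--     return the first class whose descendant set covers every other simple name."""
--     class_paths = [c[0] for c in class_list]
--     if len(class_paths) == 1:
--         return class_paths[0]
--
--     simple_names = {path: path.split("/")[-1] for path in class_paths}
--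
--     def ancestors(name: str) -> List[str]:
--         result = []
--         seen = set()
--         current = name
--         while current in child_to_parent and current not in seen:
--             seen.add(current)
--             current = child_to_parent[current]
--             result.append(current)
--         return result
--
--     # Inverted index: for each ancestor name, the set of listed classes below it.
--     descendants: Dict[str, set] = {}
--     for sn in simple_names.values():
--         for a in ancestors(sn):
--             descendants.setdefault(a, set()).add(sn)
--
--     names = set(simple_names.values())
--     for path, sn in simple_names.items():
--         if names - {sn} <= descendants.get(sn, set()):
--             return path
--     return class_paths[0]
-- ===== Notes on version B (the rewrite author's own statement) =====
-- stated objective: alternative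
-- what changed: B replaces A's per-class ancestor-list dict plus pairwise all()-over-others membership scan with an inverted descendants index built in one pass over the ancestor walks, followed by a single set-subset check per class.
import Mathlib
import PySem

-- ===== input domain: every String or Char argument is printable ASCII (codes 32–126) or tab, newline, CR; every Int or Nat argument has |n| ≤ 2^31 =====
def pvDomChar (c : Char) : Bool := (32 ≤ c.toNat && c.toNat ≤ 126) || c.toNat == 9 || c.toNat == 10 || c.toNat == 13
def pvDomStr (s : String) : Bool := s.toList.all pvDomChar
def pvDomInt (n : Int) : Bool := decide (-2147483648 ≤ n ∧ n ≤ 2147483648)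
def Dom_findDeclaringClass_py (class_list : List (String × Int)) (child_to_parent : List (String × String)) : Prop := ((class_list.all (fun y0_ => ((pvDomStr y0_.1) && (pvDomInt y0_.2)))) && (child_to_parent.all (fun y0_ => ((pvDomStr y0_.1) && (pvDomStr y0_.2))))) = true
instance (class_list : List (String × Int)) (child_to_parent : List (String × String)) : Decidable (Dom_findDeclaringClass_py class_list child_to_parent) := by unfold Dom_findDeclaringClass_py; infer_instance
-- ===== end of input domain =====

-- B replaces A's pairwise "is this class in every other class's ancestor list" scan by an
-- inverted descendants index built in one pass, then a single subset check per class (objective: alternative).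

-- ===== PORT A =====
-- helper shared verbatim by both Pythons: path.split("/")[-1] (split result is never empty, so getLastD is exact)
def pvSimpleName (p : String) : String := (((PySem.Str.split? p "/").getD []).getLastD "")  -- sep "/" ≠ "", so split? is some

-- helper shared verbatim by both Pythons: the cycle-guarded ancestor walk.
-- Fuel d.size + 1: each loop iteration consumes a key of d not yet in `seen`, so at most d.size iterations happen.
def pvAncestorsAux (d : PySem.Dict String String) : Nat → PySem.Set String → String → List String
  | 0, _, _ => []
  | fuel+1, seen, current =>
    match d.get? current with
    | none => []
    | some parent =>
      if seen.contains current then []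
      else parent :: pvAncestorsAux d fuel (PySem.Set.add seen current) parent

def pvAncestors (d : PySem.Dict String String) (name : String) : List String :=
  pvAncestorsAux d (d.size + 1) PySem.Set.empty name

-- helper shared verbatim by both Pythons: the dict comprehension {path: path.split("/")[-1] for path in class_paths}
def pvSimpleNames (class_paths : List String) : PySem.Dict String String :=
  class_paths.foldl (fun m p => m.insert p (pvSimpleName p)) PySem.Dict.empty

-- A's final for-loop with early return
def pvScanA (hier : PySem.Dict String (List String)) (vals : List String) :
    List (String × String) → Option String
  | [] => none
  | q :: rest =>
    let others := vals.filter (fun x => decide (x ≠ q.2))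
    if others.all (fun other => decide (q.2 ∈ hier.getD other [])) then some q.1
    else pvScanA hier vals rest

def findDeclaringClass_py (class_list : List (String × Int)) (child_to_parent : List (String × String)) : String :=
  let class_paths := class_list.map (·.1)
  if class_paths.length == 1 then class_paths.headD ""   -- class_paths[0]; exact under Pre_ (class_list ≠ [])
  else
    let d := PySem.Dict.ofList child_to_parent
    let simple_names := pvSimpleNames class_paths
    let hier := simple_names.items.foldl
      (fun (h : PySem.Dict String (List String)) q => h.insert q.2 (pvAncestors d q.2)) PySem.Dict.empty
    match pvScanA hier simple_names.values simple_names.items with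
    | some p => p
    | none => class_paths.headD ""   -- class_paths[0]; exact under Pre_

-- ===== PORT B =====
def findDeclaringClass_py_alt (class_list : List (String × Int)) (child_to_parent : List (String × String)) : String :=
  let class_paths := class_list.map (·.1)
  if class_paths.length == 1 then class_paths.headD ""   -- class_paths[0]; exact under Pre_
  else
    let d := PySem.Dict.ofList child_to_parent
    let simple_names := pvSimpleNames class_paths
    -- inverted index: descendants.setdefault(a, set()).add(sn)
    let desc := simple_names.values.foldl
      (fun (m : PySem.Dict String (PySem.Set String)) sn =>
        (pvAncestors d sn).foldl (fun m a => m.modify a PySem.Set.empty (fun s => PySem.Set.add s sn)) m)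
      PySem.Dict.empty
    let names := PySem.Set.ofList simple_names.values
    match simple_names.items.find? (fun q =>
        PySem.Set.issubset (PySem.Set.diff names (PySem.Set.ofList [q.2])) (desc.getD q.2 PySem.Set.empty)) with
    | some q => q.1
    | none => class_paths.headD ""   -- class_paths[0]; exact under Pre_

-- ===== PRECONDITION & SPEC =====
-- Pre_ excludes only class_list = [], where the Python A (and B) raises IndexError on class_paths[0].
def Pre_findDeclaringClass_py (class_list : List (String × Int)) (child_to_parent : List (String × String)) : Prop :=
  class_list ≠ []
instance (class_list : List (String × Int)) (child_to_parent : List (String × String)) : Decidable (Pre_findDeclaringClass_py class_list child_to_parent) := by unfold Pre_findDeclaringClass_py; infer_instance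

def pvWitness_findDeclaringClass_py : (List (String × Int)) × (List (String × String)) :=
  ([("p/A", 0), ("p/B", 1)], [("B", "A")])

def Spec_findDeclaringClass_py (class_list : List (String × Int)) (child_to_parent : List (String × String)) (out : String) : Prop := out = findDeclaringClass_py_alt class_list child_to_parent
instance (class_list : List (String × Int)) (child_to_parent : List (String × String)) (out : String) : Decidable (Spec_findDeclaringClass_py class_list child_to_parent out) := by unfold Spec_findDeclaringClass_py; infer_instance

-- ===== CLAIM (what is proved, stated in full; the proofs are below) =====
def Claim_equal_findDeclaringClass_py : Prop := ∀ (class_list : List (String × Int)) (child_to_parent : List (String × String)), Dom_findDeclaringClass_py class_list child_to_parent → Pre_findDeclaringClass_py class_list child_to_parent → Spec_findDeclaringClass_py class_list child_to_parent (findDeclaringClass_py class_list child_to_parent)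

-- ===== LEMMAS AND PROOFS =====

theorem getD_foldl_insert_keyfun (f : String → List String) (l : List (String × String))
    (h0 : PySem.Dict String (List String)) (k : String) :
    (l.foldl (fun h q => h.insert q.2 (f q.2)) h0).getD k [] =
      if k ∈ l.map (·.2) then f k else h0.getD k [] := by
  induction l generalizing h0 with
  | nil => simp
  | cons q rest ih =>
    simp only [List.foldl_cons, ih, List.map_cons, List.mem_cons]
    rcases eq_or_ne k q.2 with h | h <;>
      by_cases hm : k ∈ rest.map (·.2) <;>
        simp [hm, h, PySem.Dict.getD_insert]

theorem mem_getD_foldl_modify_inner (sn : String) (as : List String)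
    (m : PySem.Dict String (PySem.Set String)) (k x : String) :
    (x ∈ (as.foldl (fun m a => m.modify a PySem.Set.empty (fun s => PySem.Set.add s sn)) m).getD k PySem.Set.empty)
      ↔ x ∈ m.getD k PySem.Set.empty ∨ (x = sn ∧ k ∈ as) := by
  induction as generalizing m with
  | nil => simp
  | cons a rest ih =>
    simp only [List.foldl_cons, ih, PySem.Dict.getD_modify, List.mem_cons]
    rcases eq_or_ne k a with h | h
    · subst h; simp only [if_true]; rw [PySem.Set.mem_add]; tauto
    · simp only [h, if_false]; tauto

theorem mem_getD_desc (g : String → List String) (l : List String)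
    (m : PySem.Dict String (PySem.Set String)) (k x : String) :
    (x ∈ (l.foldl (fun m sn => (g sn).foldl (fun m a => m.modify a PySem.Set.empty (fun s => PySem.Set.add s sn)) m) m).getD k PySem.Set.empty)
      ↔ x ∈ m.getD k PySem.Set.empty ∨ (x ∈ l ∧ k ∈ g x) := by
  induction l generalizing m with
  | nil => simp
  | cons sn rest ih =>
    simp only [List.foldl_cons, ih, mem_getD_foldl_modify_inner, List.mem_cons]
    constructor
    · rintro ((h | ⟨rfl, h⟩) | ⟨h1, h2⟩)
      · exact Or.inl h
      · exact Or.inr ⟨Or.inl rfl, h⟩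
      · exact Or.inr ⟨Or.inr h1, h2⟩
    · rintro (h | ⟨(rfl | h1), h2⟩)
      · exact Or.inl (Or.inl h)
      · exact Or.inl (Or.inr ⟨rfl, h2⟩)
      · exact Or.inr ⟨h1, h2⟩

theorem scanA_eq_find (hier : PySem.Dict String (List String)) (vals : List String)
    (p : String × String → Bool) (l : List (String × String))
    (hp : ∀ q ∈ l,
      ((vals.filter (fun x => decide (x ≠ q.2))).all (fun other => decide (q.2 ∈ hier.getD other []))) = p q) :
    pvScanA hier vals l = (l.find? p).map (·.1) := by
  induction l with
  | nil => simp [pvScanA]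
  | cons q rest ih =>
    have h1 := hp q (by simp)
    rw [pvScanA, List.find?_cons]
    by_cases hc : p q = true
    · simp only [h1, hc, if_true]; rfl
    · have : p q = false := by simpa using hc
      simp only [h1, this, Bool.false_eq_true, if_false]
      exact ih (fun q' hq' => hp q' (by simp [hq']))

-- pointwise equality of the two scan predicates
theorem pred_eq (d : PySem.Dict String String) (cp : List String) (q : String × String) :
    ((pvSimpleNames cp).values.filter (fun x => decide (x ≠ q.2))).all
        (fun other => decide (q.2 ∈
          ((pvSimpleNames cp).items.foldl
            (fun (h : PySem.Dict String (List String)) r => h.insert r.2 (pvAncestors d r.2)) PySem.Dict.empty).getD other []))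
      =
    PySem.Set.issubset (PySem.Set.diff (PySem.Set.ofList (pvSimpleNames cp).values) (PySem.Set.ofList [q.2]))
        (((pvSimpleNames cp).values.foldl
            (fun (m : PySem.Dict String (PySem.Set String)) sn =>
              (pvAncestors d sn).foldl (fun m a => m.modify a PySem.Set.empty (fun s => PySem.Set.add s sn)) m)
            PySem.Dict.empty).getD q.2 PySem.Set.empty) := by
  have hvals : (pvSimpleNames cp).values = (pvSimpleNames cp).items.map (·.2) := rfl
  rw [Bool.eq_iff_iff, List.all_eq_true, PySem.Set.issubset_iff]
  constructor
  · intro hall x hx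
    rw [PySem.Set.mem_diff, PySem.Set.mem_ofList, PySem.Set.mem_ofList] at hx
    obtain ⟨hxv, hxne⟩ := hx
    simp only [List.mem_singleton] at hxne
    have hmem := hall x (by simp [List.mem_filter, hxv, hxne])
    rw [getD_foldl_insert_keyfun, ← hvals] at hmem
    simp only [hxv, if_true] at hmem
    rw [mem_getD_desc]
    exact Or.inr ⟨hxv, by simpa using hmem⟩
  · intro hs x hx
    rw [List.mem_filter] at hx
    obtain ⟨hxv, hxne⟩ := hx
    have hxne2 : x ≠ q.2 := by simpa using hxne
    have hxin : x ∈ PySem.Set.diff (PySem.Set.ofList (pvSimpleNames cp).values) (PySem.Set.ofList [q.2]) := by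
      rw [PySem.Set.mem_diff, PySem.Set.mem_ofList, PySem.Set.mem_ofList]
      exact ⟨hxv, by simpa using hxne2⟩
    have hmem := hs x hxin
    rw [mem_getD_desc] at hmem
    rcases hmem with hfalse | ⟨_, hanc⟩
    · simp [PySem.Dict.getD_empty] at hfalse
    · rw [getD_foldl_insert_keyfun, ← hvals]
      simp [hxv, hanc]

theorem match_map_fst (o : Option (String × String)) (df : String) :
    (match o.map (·.1) with | some p => p | none => df)
      = (match o with | some q => q.1 | none => df) := by
  cases o <;> rfl

-- ===== VERDICT (by name: the statement is the Claim_ definition above) =====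
theorem findDeclaringClass_py_spec : Claim_equal_findDeclaringClass_py := by
  intro class_list child_to_parent _hdom _hpre
  unfold Spec_findDeclaringClass_py findDeclaringClass_py findDeclaringClass_py_alt
  by_cases hlen : ((class_list.map (·.1)).length == 1) = true
  · simp only [hlen, if_true]
  · simp only [eq_false_of_ne_true hlen, Bool.false_eq_true, if_false]
    rw [scanA_eq_find _ _ _ _
      (fun q _ => pred_eq (PySem.Dict.ofList child_to_parent) (class_list.map (·.1)) q)]
    exact match_map_fst _ _
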